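-- pv_equiv track=rewrite | github.com/btcaf/autobusy | autobusy/analyzer/parser.py | parse_line_routes
-- ===== SOURCE A (Python) =====
-- def parse_line_routes(route_lines: list[str]) -> list[list[str]]:
--     res = []
--     curr = []
--     for route_line in route_lines:
--         r_pos = route_line.find(' r ')
--         if r_pos != -1:
--             stop = route_line[r_pos:].split()[1]
--             if stop != '-':
--                 curr.append(stop)
--         elif '#LW' in route_line:
--             res.append(curr)
--             curr = []
--     return res
-- ===== SOURCE B (Python) =====
-- def parse_line_routes(route_lines: list[str]) -> list[list[str]]:
--     # Phase 1: reduce each line to a token: a stop name, or None as an end-of-route marker.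
--     tokens = []
--     for line in route_lines:
--         i = line.find(' r ')
--         if i != -1:
--             tokens.append(line[i:].split()[1])
--         elif '#LW' in line:
--             tokens.append(None)
--     # Phase 2: split the token stream on markers; only segments closed by a marker
--     # are kept (a trailing open segment is discarded) and '-' placeholders dropped.
--     res = []
--     seg = []
--     for t in tokens:
--         if t is None:
--             res.append(seg)
--             seg = []
--         elif t != '-':
--             seg.append(t)
--     return res
-- ===== Notes on version B (the rewrite author's own statement) =====
-- stated objective: alternative
-- what changed: A's single interleaved loop with (res, curr) state is replaced by a two-phase pipeline: map each line to a token (stop name or end-of-route marker), then split the token stream on markers.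
import Mathlib
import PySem

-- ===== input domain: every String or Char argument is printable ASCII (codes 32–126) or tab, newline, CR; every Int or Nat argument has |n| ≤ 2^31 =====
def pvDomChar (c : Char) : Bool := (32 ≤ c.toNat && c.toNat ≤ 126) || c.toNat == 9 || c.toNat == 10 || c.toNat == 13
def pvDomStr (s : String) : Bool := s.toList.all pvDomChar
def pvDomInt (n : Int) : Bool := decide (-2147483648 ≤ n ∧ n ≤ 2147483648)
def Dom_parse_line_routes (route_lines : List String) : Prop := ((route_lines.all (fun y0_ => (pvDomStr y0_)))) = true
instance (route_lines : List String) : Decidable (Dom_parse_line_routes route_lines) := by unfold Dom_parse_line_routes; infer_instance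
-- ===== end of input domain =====

-- B re-decomposes A's interleaved loop into two phases (map lines to a token stream, then split
-- the stream on end-of-route markers); objective: alternative structure, same cost; same return value.

-- ===== PORT A =====
def parse_line_routes (route_lines : List String) : List (List String) :=
  (route_lines.foldl (fun (st : List (List String) × List String) route_line =>
      let r_pos := PySem.Str.find route_line " r "
      if r_pos ≠ -1 then
        -- route_line[r_pos:].split()[1]; Python raises IndexError when index 1 is absent
        -- (Pre_ excludes that), the port uses getD "" there
        let stop := ((PySem.List.pyGet? (PySem.Str.split₀ (PySem.Str.slice route_line (some r_pos) none)) 1).getD "")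
        if stop ≠ "-" then (st.1, st.2 ++ [stop]) else st
      else if PySem.Str.isIn "#LW" route_line then (st.1 ++ [st.2], [])
      else st)
    ([], [])).1

-- ===== PORT B =====
-- Phase 1 of B: each line becomes a stop token, an end-of-route marker (none), or nothing.
def pvTokens (route_lines : List String) : List (Option String) :=
  route_lines.foldl (fun toks line =>
    let i := PySem.Str.find line " r "
    if i ≠ -1 then
      toks ++ [some ((PySem.List.pyGet? (PySem.Str.split₀ (PySem.Str.slice line (some i) none)) 1).getD "")]
    else if PySem.Str.isIn "#LW" line then toks ++ [none]
    else toks) []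

def parse_line_routes_alt (route_lines : List String) : List (List String) :=
  -- Phase 2 of B: split the token stream on markers, dropping "-" and the trailing open segment.
  (((pvTokens route_lines).foldl (fun (st : List (List String) × List String) t =>
      match t with
      | none => (st.1 ++ [st.2], [])
      | some s => if s ≠ "-" then (st.1, st.2 ++ [s]) else st)
    ([], []))).1

-- ===== PRECONDITION & SPEC =====
-- Pre_ excludes exactly the inputs on which Python A raises IndexError: a line whose first
-- ' r ' occurrence is followed only by whitespace, so that line[r_pos:].split()[1] is absent.
def Pre_parse_line_routes (route_lines : List String) : Prop :=
  ∀ line ∈ route_lines,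
    PySem.Str.find line " r " ≠ -1 →
    2 ≤ (PySem.Str.split₀ (PySem.Str.slice line (some (PySem.Str.find line " r ")) none)).length
instance (route_lines : List String) : Decidable (Pre_parse_line_routes route_lines) := by
  unfold Pre_parse_line_routes; infer_instance
def pvWitness_parse_line_routes : List String := ["101 r GDANSKA", "330 r -", "#LW end", "x r S2"]

def Spec_parse_line_routes (route_lines : List String) (out : List (List String)) : Prop := out = parse_line_routes_alt route_lines
instance (route_lines : List String) (out : List (List String)) : Decidable (Spec_parse_line_routes route_lines out) := by unfold Spec_parse_line_routes; infer_instance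

-- ===== CLAIM (what is proved, stated in full; the proofs are below) =====
def Claim_equal_parse_line_routes : Prop := ∀ (route_lines : List String), Dom_parse_line_routes route_lines → Pre_parse_line_routes route_lines → Spec_parse_line_routes route_lines (parse_line_routes route_lines)

-- ===== LEMMAS AND PROOFS =====

-- per-line token contribution (proof helper)
def pvTokLine (line : String) : List (Option String) :=
  let i := PySem.Str.find line " r "
  if i ≠ -1 then
    [some ((PySem.List.pyGet? (PySem.Str.split₀ (PySem.Str.slice line (some i) none)) 1).getD "")]
  else if PySem.Str.isIn "#LW" line then [none]
  else []

theorem pvStepTok (toks : List (Option String)) (line : String) :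
    (let i := PySem.Str.find line " r "
     if i ≠ -1 then
       toks ++ [some ((PySem.List.pyGet? (PySem.Str.split₀ (PySem.Str.slice line (some i) none)) 1).getD "")]
     else if PySem.Str.isIn "#LW" line then toks ++ [none]
     else toks)
    = toks ++ pvTokLine line := by
  unfold pvTokLine
  by_cases h : PySem.Str.find line " r " ≠ -1
  · simp only [if_pos h]
  · simp only [if_neg h]
    by_cases h2 : PySem.Str.isIn "#LW" line = true
    · rw [if_pos h2, if_pos h2]
    · rw [if_neg h2, if_neg h2, List.append_nil]

theorem pvTokensAux (route_lines : List String) : ∀ (acc : List (Option String)),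
      route_lines.foldl (fun toks line =>
        let i := PySem.Str.find line " r "
        if i ≠ -1 then
          toks ++ [some ((PySem.List.pyGet? (PySem.Str.split₀ (PySem.Str.slice line (some i) none)) 1).getD "")]
        else if PySem.Str.isIn "#LW" line then toks ++ [none]
        else toks) acc = acc ++ route_lines.flatMap pvTokLine := by
  induction route_lines with
  | nil => intro acc; rw [List.foldl_nil, List.flatMap_nil, List.append_nil]
  | cons l ls ih =>
    intro acc
    rw [List.foldl_cons, List.flatMap_cons, ih, pvStepTok acc l, List.append_assoc]

theorem pvTokens_eq_flatMap (route_lines : List String) :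
    pvTokens route_lines = route_lines.flatMap pvTokLine := by
  unfold pvTokens
  rw [pvTokensAux]
  rw [List.nil_append]

theorem pvStep_eq (st : List (List String) × List String) (line : String) :
    (let r_pos := PySem.Str.find line " r "
     if r_pos ≠ -1 then
       let stop := ((PySem.List.pyGet? (PySem.Str.split₀ (PySem.Str.slice line (some r_pos) none)) 1).getD "")
       if stop ≠ "-" then (st.1, st.2 ++ [stop]) else st
     else if PySem.Str.isIn "#LW" line then (st.1 ++ [st.2], [])
     else st)
    = (pvTokLine line).foldl (fun st t =>
        match t with
        | none => (st.1 ++ [st.2], [])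
        | some s => if s ≠ "-" then (st.1, st.2 ++ [s]) else st) st := by
  unfold pvTokLine
  by_cases h : PySem.Str.find line " r " ≠ -1
  · simp only [if_pos h, List.foldl_cons, List.foldl_nil]
  · simp only [if_neg h]
    by_cases h2 : PySem.Str.isIn "#LW" line = true
    · rw [if_pos h2, if_pos h2]; rfl
    · rw [if_neg h2, if_neg h2]; rfl

theorem pvFold_eq (route_lines : List String) :
    ∀ (st : List (List String) × List String),
      route_lines.foldl (fun (st : List (List String) × List String) route_line =>
        let r_pos := PySem.Str.find route_line " r "
        if r_pos ≠ -1 then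
          let stop := ((PySem.List.pyGet? (PySem.Str.split₀ (PySem.Str.slice route_line (some r_pos) none)) 1).getD "")
          if stop ≠ "-" then (st.1, st.2 ++ [stop]) else st
        else if PySem.Str.isIn "#LW" route_line then (st.1 ++ [st.2], [])
        else st) st
      = (route_lines.flatMap pvTokLine).foldl (fun st t =>
          match t with
          | none => (st.1 ++ [st.2], [])
          | some s => if s ≠ "-" then (st.1, st.2 ++ [s]) else st) st := by
  induction route_lines with
  | nil => intro st; rfl
  | cons l ls ih =>
    intro st
    simp only [List.foldl_cons, List.flatMap_cons, List.foldl_append]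
    rw [pvStep_eq]
    exact ih _

-- ===== VERDICT (by name: the statement is the Claim_ definition above) =====
theorem parse_line_routes_spec : Claim_equal_parse_line_routes := by
  intro route_lines _ _
  unfold Spec_parse_line_routes parse_line_routes parse_line_routes_alt
  rw [pvTokens_eq_flatMap, pvFold_eq]
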